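-- pv_equiv track=rewrite | github.com/SeppoPakonen/Maestro | maestro/tracks/md_store.py | _parse_asterisk_wrapped_value
-- ===== SOURCE A (Python) =====
-- from typing import List, Dict, Any, Optional, Tuple
--
-- def _parse_asterisk_wrapped_value(value_str: str) -> Optional[str]:
--     """Parse a value wrapped in asterisks, handling escaping."""
--     if not value_str.startswith('*'):
--         return None
--     buf = []
--     escaped = False
--     for idx in range(1, len(value_str)):
--         ch = value_str[idx]
--         if escaped:
--             buf.append(ch)
--             escaped = False
--             continue
--         if ch == '\\':
--             escaped = True
--             continue
--         if ch == '*':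
--             return "".join(buf)
--         buf.append(ch)
--     return None
-- ===== SOURCE B (Python) =====
-- def _parse_asterisk_wrapped_value(value_str):
--     """Parse a value wrapped in asterisks, handling escaping.
--
--     Staged decomposition: split the tail on backslash once, then walk the
--     resulting segments; each segment after a separator starts with an escaped
--     literal (an empty segment means the escaped literal was a backslash and
--     consumes the following segment as plain text); plain text is scanned for
--     the closing '*' with str.find."""
--     if not value_str.startswith('*'):
--         return None
--     parts = value_str[1:].split('\\')
--     out = []
--
--     def emit_plain(seg):
--         j = seg.find('*')
--         if j == -1:
--             out.append(seg)
--             return None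
--         out.append(seg[:j])
--         return ''.join(out)
--
--     res = emit_plain(parts[0])
--     if res is not None:
--         return res
--     rest = parts[1:]
--     while rest:
--         p = rest[0]
--         rest = rest[1:]
--         if p == '':
--             if not rest:
--                 return None  # trailing backslash: closing '*' never reached
--             out.append('\\')
--             res = emit_plain(rest[0])
--             rest = rest[1:]
--         else:
--             out.append(p[0])
--             res = emit_plain(p[1:])
--         if res is not None:
--             return res
--     return None
-- ===== Notes on version B (the rewrite author's own statement) =====
-- stated objective: alternative
-- what changed: Replaces A's single character-by-character scan carrying an escape flag by a staged decomposition: split the tail once on backslash, then walk the resulting segments, where each segment after a separator starts with an escaped literal (an empty segment encodes an escaped backslash and consumes the next segment) and plain text is searched for the closing '*' with str.find.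
import Mathlib
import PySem

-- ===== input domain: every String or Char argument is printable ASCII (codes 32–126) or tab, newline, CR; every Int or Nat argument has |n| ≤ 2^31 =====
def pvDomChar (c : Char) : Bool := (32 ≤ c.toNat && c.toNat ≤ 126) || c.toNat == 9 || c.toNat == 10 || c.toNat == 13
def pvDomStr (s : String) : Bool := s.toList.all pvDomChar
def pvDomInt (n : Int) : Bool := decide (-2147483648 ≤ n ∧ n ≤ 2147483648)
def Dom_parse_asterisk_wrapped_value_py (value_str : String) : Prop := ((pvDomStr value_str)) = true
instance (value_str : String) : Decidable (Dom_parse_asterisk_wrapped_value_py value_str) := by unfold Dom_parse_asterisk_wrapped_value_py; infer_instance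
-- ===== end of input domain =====

-- B replaces A's per-character escape-flag state machine by a staged decomposition:
-- split the tail on backslash once, then walk the segments (alternative, same cost).

-- ===== PORT A =====
-- for-loop over range(1, len): per-character scan carrying buf and the 'escaped' flag
def pvAGo (buf : List Char) (escaped : Bool) : List Char → Option String
  | [] => none
  | ch :: rest =>
    if escaped then pvAGo (buf ++ [ch]) false rest
    else if ch = '\\' then pvAGo buf true rest
    else if ch = '*' then some (String.ofList buf)
    else pvAGo (buf ++ [ch]) false rest

def parse_asterisk_wrapped_value_py (value_str : String) : Option String :=
  if PySem.Str.startswith value_str "*" then pvAGo [] false (value_str.toList.drop 1)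
  else none

-- ===== PORT B =====
-- emit_plain: scan a plain (escape-free) segment for the closing '*' (seg.find('*')
-- ported as the first-occurrence index List.idxOf?); inl = keep accumulating, inr = done
def pvEmitPlain (out seg : List Char) : Sum (List Char) String :=
  match seg.idxOf? '*' with
  | none => Sum.inl (out ++ seg)
  | some j => Sum.inr (String.ofList (out ++ seg.take j))

-- the while-loop over the remaining segments: each segment begins with an escaped
-- literal; an empty segment means the literal was '\' and consumes the next segment
def pvBLoop (out : List Char) : List (List Char) → Option String
  | [] => none
  | p :: rest =>
    match p with
    | [] =>
      match rest with
      | [] => none   -- trailing backslash: closing '*' never reached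
      | q :: rest' =>
        match pvEmitPlain (out ++ ['\\']) q with
        | .inr s => some s
        | .inl out' => pvBLoop out' rest'
    | d :: tl =>
      match pvEmitPlain (out ++ [d]) tl with
      | .inr s => some s
      | .inl out' => pvBLoop out' rest

-- value_str[1:].split('\\') ported as List.splitOn '\\'
def parse_asterisk_wrapped_value_py_alt (value_str : String) : Option String :=
  if PySem.Str.startswith value_str "*" then
    match (value_str.toList.drop 1).splitOn '\\' with
    | [] => none   -- unreachable: split always yields at least one part
    | p0 :: rest =>
      match pvEmitPlain [] p0 with
      | .inr s => some s
      | .inl out => pvBLoop out rest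
  else none

-- ===== PRECONDITION & SPEC =====
def Spec_parse_asterisk_wrapped_value_py (value_str : String) (out : Option String) : Prop := out = parse_asterisk_wrapped_value_py_alt value_str
instance (value_str : String) (out : Option String) : Decidable (Spec_parse_asterisk_wrapped_value_py value_str out) := by unfold Spec_parse_asterisk_wrapped_value_py; infer_instance

-- ===== CLAIM (what is proved, stated in full; the proofs are below) =====
def Claim_equal_parse_asterisk_wrapped_value_py : Prop := ∀ (value_str : String), Dom_parse_asterisk_wrapped_value_py value_str → Spec_parse_asterisk_wrapped_value_py value_str (parse_asterisk_wrapped_value_py value_str)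

-- ===== LEMMAS AND PROOFS =====

-- proof-only helper: B's treatment of a whole parts list (first part plain, rest pvBLoop)
def pvBTop (out : List Char) : List (List Char) → Option String
  | [] => none
  | p0 :: rest =>
    match pvEmitPlain out p0 with
    | .inr s => some s
    | .inl out' => pvBLoop out' rest

theorem pvEmitPlain_nil (out : List Char) : pvEmitPlain out [] = Sum.inl out := by
  simp [pvEmitPlain]

theorem pvEmitPlain_star (out q : List Char) :
    pvEmitPlain out ('*' :: q) = Sum.inr (String.ofList out) := by
  simp [pvEmitPlain, List.idxOf?, List.findIdx?_cons]

theorem pvEmitPlain_cons (out q : List Char) (c : Char) (hc : c ≠ '*') :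
    pvEmitPlain out (c :: q) = pvEmitPlain (out ++ [c]) q := by
  simp only [pvEmitPlain, List.idxOf?, List.findIdx?_cons, beq_iff_eq, hc, if_false]
  cases h : List.findIdx? (· == '*') q with
  | none => simp
  | some j => simp [List.take_succ_cons]

-- core invariant: A's flag machine equals B's segment walk over splitOn '\'
-- (unescaped state ↔ pvBTop, escaped state ↔ pvBLoop)
theorem pvGo_eq (n : Nat) : ∀ (l : List Char), l.length ≤ n → ∀ out,
    pvAGo out false l = pvBTop out (l.splitOn '\\') ∧
    pvAGo out true l = pvBLoop out (l.splitOn '\\') := by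
  induction n with
  | zero =>
    intro l h out
    have : l = [] := List.length_eq_zero_iff.mp (Nat.le_zero.mp h)
    subst this
    constructor
    · simp [pvAGo, List.splitOn, List.splitOnP_nil, pvBTop, pvEmitPlain_nil, pvBLoop]
    · simp [pvAGo, List.splitOn, List.splitOnP_nil, pvBLoop]
  | succ n ih =>
    intro l h out
    cases l with
    | nil =>
      constructor
      · simp [pvAGo, List.splitOn, List.splitOnP_nil, pvBTop, pvEmitPlain_nil, pvBLoop]
      · simp [pvAGo, List.splitOn, List.splitOnP_nil, pvBLoop]
    | cons c rest =>
      have hlen : rest.length ≤ n := by simp at h; omega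
      constructor
      · -- unescaped state
        by_cases hc : c = '\\'
        · subst hc
          have hsplit : (('\\' : Char) :: rest).splitOn '\\' = [] :: rest.splitOn '\\' := by
            simp [List.splitOn, List.splitOnP_cons]
          rw [hsplit]
          show pvAGo out true rest = pvBTop out ([] :: rest.splitOn '\\')
          rw [(ih rest hlen out).2]
          simp [pvBTop, pvEmitPlain_nil]
        · obtain ⟨q, rest', hq⟩ : ∃ q rest', rest.splitOn '\\' = q :: rest' := by
            cases hsp : rest.splitOn '\\' with
            | nil => exact absurd hsp (List.splitOnP_ne_nil _ _)
            | cons q rest' => exact ⟨q, rest', rfl⟩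
          have hsplit : (c :: rest).splitOn '\\' = (c :: q) :: rest' := by
            simp [List.splitOn, List.splitOnP_cons, hc]
            rw [show rest.splitOnP (· == '\\') = q :: rest' from hq]
            rfl
          rw [hsplit]
          by_cases hs : c = '*'
          · subst hs
            simp [pvAGo, hc, pvBTop, pvEmitPlain_star]
          · show pvAGo out false (c :: rest) = pvBTop out ((c :: q) :: rest')
            have hstep : pvAGo out false (c :: rest) = pvAGo (out ++ [c]) false rest := by
              simp [pvAGo, hc, hs]
            rw [hstep, (ih rest hlen (out ++ [c])).1, hq]
            simp [pvBTop, pvEmitPlain_cons _ _ _ hs]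
      · -- escaped state: the pending backslash consumes c as a literal
        have hstep : pvAGo out true (c :: rest) = pvAGo (out ++ [c]) false rest := by
          simp [pvAGo]
        by_cases hc : c = '\\'
        · subst hc
          have hsplit : (('\\' : Char) :: rest).splitOn '\\' = [] :: rest.splitOn '\\' := by
            simp [List.splitOn, List.splitOnP_cons]
          rw [hstep, hsplit, (ih rest hlen (out ++ ['\\'])).1]
          obtain ⟨q, rest', hq⟩ : ∃ q rest', rest.splitOn '\\' = q :: rest' := by
            cases hsp : rest.splitOn '\\' with
            | nil => exact absurd hsp (List.splitOnP_ne_nil _ _)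
            | cons q rest' => exact ⟨q, rest', rfl⟩
          rw [hq]
          simp [pvBTop, pvBLoop]
        · obtain ⟨q, rest', hq⟩ : ∃ q rest', rest.splitOn '\\' = q :: rest' := by
            cases hsp : rest.splitOn '\\' with
            | nil => exact absurd hsp (List.splitOnP_ne_nil _ _)
            | cons q rest' => exact ⟨q, rest', rfl⟩
          have hsplit : (c :: rest).splitOn '\\' = (c :: q) :: rest' := by
            simp [List.splitOn, List.splitOnP_cons, hc]
            rw [show rest.splitOnP (· == '\\') = q :: rest' from hq]
            rfl
          rw [hstep, hsplit, (ih rest hlen (out ++ [c])).1, hq]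
          simp [pvBTop, pvBLoop]

-- ===== VERDICT (by name: the statement is the Claim_ definition above) =====
theorem parse_asterisk_wrapped_value_py_spec : Claim_equal_parse_asterisk_wrapped_value_py := by
  intro value_str _
  unfold Spec_parse_asterisk_wrapped_value_py parse_asterisk_wrapped_value_py parse_asterisk_wrapped_value_py_alt
  split
  · rw [(pvGo_eq (value_str.toList.drop 1).length _ le_rfl []).1]
    cases hsp : (value_str.toList.drop 1).splitOn '\\' with
    | nil => simp [pvBTop]
    | cons p0 r => simp [pvBTop]
  · rfl
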